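-- pv_equiv track=rewrite | github.com/UT07/daily-job-hunt | latex_compiler.py | check_brace_balance
-- ===== SOURCE A (Python) =====
-- def check_brace_balance(content: str) -> bool:
--     """Hard gate: return False if braces are unbalanced.
--
--     Skips escaped braces (\\{ and \\}).
--     """
--     depth = 0
--     i = 0
--     while i < len(content):
--         if content[i] == '\\' and i + 1 < len(content) and content[i + 1] in '{}':
--             i += 2  # Skip escaped braces
--             continue
--         if content[i] == '{':
--             depth += 1
--         elif content[i] == '}':
--             depth -= 1
--             if depth < 0:
--                 return False
--         i += 1
--     return depth == 0
-- ===== SOURCE B (Python) =====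
-- import re
--
-- def check_brace_balance(content: str) -> bool:
--     """Two-pass version: delete escaped braces with one regex, then count depth."""
--     cleaned = re.sub(r'\\[{}]', '', content)
--     depth = 0
--     for ch in cleaned:
--         if ch == '{':
--             depth += 1
--         elif ch == '}':
--             depth -= 1
--             if depth < 0:
--                 return False
--     return depth == 0
-- ===== Notes on version B (the rewrite author's own statement) =====
-- stated objective: simpler
-- what changed: Replaces the fused index-walking loop (manual i+=2 skipping of escaped braces) with two plain passes: a single regex substitution that deletes every escaped brace, then a straightforward depth counter over the cleaned string.
import Mathlib
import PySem

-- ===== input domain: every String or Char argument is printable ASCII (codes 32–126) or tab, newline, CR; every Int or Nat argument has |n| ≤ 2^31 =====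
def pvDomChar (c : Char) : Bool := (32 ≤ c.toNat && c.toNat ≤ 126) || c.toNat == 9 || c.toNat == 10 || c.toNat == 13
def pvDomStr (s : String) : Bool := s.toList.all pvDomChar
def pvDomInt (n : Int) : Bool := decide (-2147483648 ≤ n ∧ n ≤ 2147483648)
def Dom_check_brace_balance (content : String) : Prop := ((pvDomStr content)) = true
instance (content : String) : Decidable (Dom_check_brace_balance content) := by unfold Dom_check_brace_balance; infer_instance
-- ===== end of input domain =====

-- B replaces A's fused index-walking loop with two plain passes (delete escaped braces, then count depth); same O(n) cost, simpler decomposition.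


-- ===== PORT A =====
-- A's while-loop over indices, transcribed as recursion on the character list:
-- at each position either skip an escaped brace (two chars), or adjust depth by one char.
def cbbGoA : List Char → Int → Bool
  | [], depth => depth == 0
  | '\\' :: c :: rest, depth =>
    -- escape guard: '\' with a following brace skips both; otherwise '\' matches no
    -- brace test in A, so it falls through and only i advances
    if c = '{' ∨ c = '}' then cbbGoA rest depth
    else cbbGoA (c :: rest) depth
  | a :: rest, depth =>
    if a = '{' then cbbGoA rest (depth + 1)
    else if a = '}' then
      if depth - 1 < 0 then false else cbbGoA rest (depth - 1)
    else cbbGoA rest depth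

def check_brace_balance (content : String) : Bool := cbbGoA content.toList 0

-- ===== PORT B =====
-- pass 1: re.sub(r'\\[{}]', '', content) — left-to-right non-overlapping deletion of escaped braces
def cbbClean : List Char → List Char
  | [] => []
  | '\\' :: c :: r => if c = '{' ∨ c = '}' then cbbClean r else '\\' :: cbbClean (c :: r)
  | a :: r => a :: cbbClean r

-- pass 2: plain depth counter
def cbbCount : List Char → Int → Bool
  | [], depth => depth == 0
  | a :: r, depth =>
    if a = '{' then cbbCount r (depth + 1)
    else if a = '}' then
      if depth - 1 < 0 then false else cbbCount r (depth - 1)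
    else cbbCount r depth

def check_brace_balance_alt (content : String) : Bool := cbbCount (cbbClean content.toList) 0

-- ===== PRECONDITION & SPEC =====
def Spec_check_brace_balance (content : String) (out : Bool) : Prop := out = check_brace_balance_alt content
instance (content : String) (out : Bool) : Decidable (Spec_check_brace_balance content out) := by unfold Spec_check_brace_balance; infer_instance

-- ===== CLAIM (what is proved, stated in full; the proofs are below) =====
def Claim_equal_check_brace_balance : Prop := ∀ (content : String), Dom_check_brace_balance content → Spec_check_brace_balance content (check_brace_balance content)

-- ===== LEMMAS AND PROOFS =====
theorem cbbCount_clean (l : List Char) : ∀ depth, cbbCount (cbbClean l) depth = cbbGoA l depth := by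
  induction l using cbbClean.induct with
  | case1 => intro d; rfl
  | case2 c r h ih =>
    intro d
    simp only [cbbClean, cbbGoA, if_pos h]
    exact ih d
  | case3 c r h ih =>
    intro d
    simp only [cbbClean, cbbGoA, if_neg h, cbbCount]
    norm_num
    exact ih d
  | case4 a r ha ih =>
    intro d
    have hcl : cbbClean (a :: r) = a :: cbbClean r := by
      rw [cbbClean.eq_def]
      split
      · rename_i heq; exact absurd heq (by simp)
      · rename_i heq
        injection heq with h1 h2
        exact (ha _ _ h1 h2).elim
      · rename_i heq
        injection heq with h1 h2
        rw [h1, h2]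
    have hgo : cbbGoA (a :: r) d =
        (if a = '{' then cbbGoA r (d + 1)
         else if a = '}' then if d - 1 < 0 then false else cbbGoA r (d - 1)
         else cbbGoA r d) := by
      rw [cbbGoA.eq_def]
      split
      · rename_i heq; exact absurd heq (by simp)
      · rename_i heq
        injection heq with h1 h2
        exact (ha _ _ h1 h2).elim
      · rename_i heq
        injection heq with h1 h2
        rw [h1, h2]
    rw [hcl, hgo, cbbCount]
    split_ifs <;> first | rfl | exact ih _

-- ===== VERDICT (by name: the statement is the Claim_ definition above) =====
theorem check_brace_balance_spec : Claim_equal_check_brace_balance := by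
  intro content _
  unfold Spec_check_brace_balance check_brace_balance check_brace_balance_alt
  exact (cbbCount_clean content.toList 0).symm
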